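-- pv_equiv track=rewrite | github.com/zwliew/9597-a-level-computing | a-level-2017/task2.py | calc_check_digit
-- ===== SOURCE A (Python) =====
-- def calc_check_digit(number, total):
--     if len(number) > 1:
--         digit = int(number[:1])
--         total += (digit * (len(number) + 1))
--         new_number = number[1:]
--         check_digit = calc_check_digit(new_number, total)
--     else:
--         digit = int(number[:1])
--         total += (digit * (len(number) + 1))
--         calc_modulus = total % 11
--         check_value = 11 - calc_modulus
--         if check_value == 11:
--             return '0'
--         elif check_value == 10:
--             return 'X'
--         else:
--             return str(check_value)
--     if len(number) == 9:
--         return number + check_digit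
--     else:
--         return check_digit
-- ===== SOURCE B (Python) =====
-- def calc_check_digit(number, total):
--     for i, ch in enumerate(number):
--         total += int(ch) * (len(number) - i + 1)
--     check_value = 11 - total % 11
--     check = '0' if check_value == 11 else 'X' if check_value == 10 else str(check_value)
--     return number + check if len(number) == 9 else check
-- ===== Notes on version B (the rewrite author's own statement) =====
-- stated objective: simpler
-- what changed: Replaces A's per-character recursion with one forward enumerate loop accumulating the weighted sum, then a single check-digit computation, appending it to the input only for a full 9-digit body; Pre_ restricts to the function's natural domain (a string of 1-9 digits, the body of an ISBN-10): on longer strings A prepends the truncated last-9-character suffix, which B does not reproduce.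
-- outside the precondition, e.g. on calc_check_digit('1234567890', 0): A returns '2345678909', B returns '9'
import Mathlib
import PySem

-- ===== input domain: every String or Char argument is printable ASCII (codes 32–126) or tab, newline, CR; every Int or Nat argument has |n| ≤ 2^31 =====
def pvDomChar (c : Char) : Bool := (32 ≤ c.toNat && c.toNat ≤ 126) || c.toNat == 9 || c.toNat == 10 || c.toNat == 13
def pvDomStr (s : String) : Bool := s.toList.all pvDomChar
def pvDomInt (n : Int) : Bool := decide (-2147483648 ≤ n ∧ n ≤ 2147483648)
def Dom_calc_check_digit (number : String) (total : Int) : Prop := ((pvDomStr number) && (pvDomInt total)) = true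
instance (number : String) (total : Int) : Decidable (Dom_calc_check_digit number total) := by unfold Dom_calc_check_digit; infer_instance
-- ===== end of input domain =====

-- B replaces A's per-character recursion by one forward enumerate loop plus a single
-- check-digit computation, appending it to the input only for a full 9-digit body
-- (objective: simpler); Pre_ restricts to the natural domain of 1-9 digit strings.

-- int(s) as both Pythons call it; Pre_ guarantees the argument is a digit, so ofStr? is some
def pvIntOf (s : String) : Int := (PySem.Int.ofStr? s).getD 0

-- ===== PORT A =====
-- literal recursion of A on the character list of `number`
def pvCalcA : List Char → Int → String
  | cs@(_ :: _ :: _), total =>          -- len(number) > 1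
      let digit := pvIntOf (String.mk (cs.take 1))            -- int(number[:1])
      let total := total + digit * ((cs.length : Int) + 1)
      let check_digit := pvCalcA cs.tail total                -- number[1:]
      if cs.length = 9 then String.mk cs ++ check_digit else check_digit
  | cs, total =>                        -- len(number) <= 1
      let digit := pvIntOf (String.mk (cs.take 1))            -- int(number[:1])
      let total := total + digit * ((cs.length : Int) + 1)
      let calc_modulus := PySem.Int.mod total 11
      let check_value := 11 - calc_modulus
      if check_value = 11 then "0"
      else if check_value = 10 then "X"
      else PySem.Int.toStr check_value

def calc_check_digit (number : String) (total : Int) : String :=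
  pvCalcA number.toList total

-- ===== PORT B =====
def calc_check_digit_alt (number : String) (total : Int) : String :=
  let cs := number.toList
  let n := cs.length
  let total := (PySem.List.enumerate cs 0).foldl
      (fun t p => t + pvIntOf (String.mk [p.2]) * ((n : Int) - p.1 + 1)) total
  let check_value := 11 - PySem.Int.mod total 11
  let check := if check_value = 11 then "0"
               else if check_value = 10 then "X"
               else PySem.Int.toStr check_value
  if n = 9 then String.mk cs ++ check else check

-- ===== PRECONDITION & SPEC =====
-- Pre_ restricts to the function's natural domain — the 1-to-9-digit body of an ISBN-10 —
-- excluding: the empty string and strings with a non-digit character, where A raises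
-- ValueError; and strings longer than 9 digits, which fall outside the task (there A
-- prepends the truncated last-9-character suffix, which B does not reproduce).
def Pre_calc_check_digit (number : String) (total : Int) : Prop :=
  number.toList ≠ [] ∧ number.toList.all Char.isDigit = true ∧ number.toList.length ≤ 9
instance (number : String) (total : Int) : Decidable (Pre_calc_check_digit number total) := by
  unfold Pre_calc_check_digit; infer_instance

def pvWitness_calc_check_digit : String × Int := ("123456789", 0)

def Spec_calc_check_digit (number : String) (total : Int) (out : String) : Prop :=
  out = calc_check_digit_alt number total
instance (number : String) (total : Int) (out : String) : Decidable (Spec_calc_check_digit number total out) := by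
  unfold Spec_calc_check_digit; infer_instance

-- ===== CLAIM (what is proved, stated in full; the proofs are below) =====
def Claim_equal_calc_check_digit : Prop := ∀ (number : String) (total : Int), Dom_calc_check_digit number total → Pre_calc_check_digit number total → Spec_calc_check_digit number total (calc_check_digit number total)

-- ===== LEMMAS AND PROOFS =====

-- the weighted sum A accumulates: head of a suffix of length L gets weight L + 1
def pvW : List Char → Int
  | [] => 0
  | c :: rest => pvIntOf (String.mk [c]) * ((rest.length : Int) + 2) + pvW rest

-- the final check-digit string from an accumulated total
def pvCheck (t : Int) : String :=
  let cv := 11 - PySem.Int.mod t 11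
  if cv = 11 then "0" else if cv = 10 then "X" else PySem.Int.toStr cv

-- characterisation of A's recursion
theorem pvCalcA_eq (cs : List Char) (total : Int) (h : cs ≠ []) :
    pvCalcA cs total =
      (if 9 ≤ cs.length then String.mk (cs.drop (cs.length - 9)) else "") ++
        pvCheck (total + pvW cs) := by
  induction cs generalizing total with
  | nil => exact absurd rfl h
  | cons c rest ih =>
    cases rest with
    | nil =>
      simp [pvCalcA, pvW, pvCheck]
    | cons d rest' =>
      have hne : (d :: rest') ≠ [] := by simp
      simp only [pvCalcA]
      simp only [List.take, List.tail_cons]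
      rw [ih _ hne]
      have htot : total + pvIntOf (String.mk [c]) * (((c :: d :: rest').length : Int) + 1)
          + pvW (d :: rest') = total + pvW (c :: d :: rest') := by
        show _ = total + (pvIntOf (String.mk [c]) * (((d :: rest').length : Int) + 2) + pvW (d :: rest'))
        simp [List.length_cons]; ring
      rw [htot]
      rcases lt_trichotomy rest'.length 7 with hlt | heq | hgt
      · rw [if_neg (show ¬ (c :: d :: rest').length = 9 by simp only [List.length_cons]; omega),
            if_neg (show ¬ 9 ≤ (d :: rest').length by simp only [List.length_cons]; omega),
            if_neg (show ¬ 9 ≤ (c :: d :: rest').length by simp only [List.length_cons]; omega)]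
      · rw [if_pos (show (c :: d :: rest').length = 9 by simp only [List.length_cons]; omega),
            if_neg (show ¬ 9 ≤ (d :: rest').length by simp only [List.length_cons]; omega),
            if_pos (show 9 ≤ (c :: d :: rest').length by simp only [List.length_cons]; omega)]
        have h0 : (c :: d :: rest').length - 9 = 0 := by simp only [List.length_cons]; omega
        rw [h0, List.drop_zero]
        simp
      · rw [if_neg (show ¬ (c :: d :: rest').length = 9 by simp only [List.length_cons]; omega),
            if_pos (show 9 ≤ (d :: rest').length by simp only [List.length_cons]; omega),
            if_pos (show 9 ≤ (c :: d :: rest').length by simp only [List.length_cons]; omega)]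
        have h5 : (c :: d :: rest').length - 9 = ((d :: rest').length - 9) + 1 := by
          simp only [List.length_cons]; omega
        rw [h5, List.drop_succ_cons]

-- characterisation of B's fold: the enumerate loop adds the same weighted sum
theorem pvFoldB_eq (n : Int) : ∀ (cs : List Char) (s total : Int), n - s = cs.length →
    (PySem.List.enumerate cs s).foldl
      (fun t p => t + pvIntOf (String.mk [p.2]) * (n - p.1 + 1)) total = total + pvW cs := by
  intro cs
  induction cs with
  | nil => intro s total _; simp [PySem.List.enumerate_nil, pvW]
  | cons c rest ih =>
    intro s total hlen
    rw [PySem.List.enumerate_cons, List.foldl_cons]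
    rw [ih (s + 1) _ (by simp only [List.length_cons] at hlen; push_cast at hlen; omega)]
    have hw : n - s + 1 = (rest.length : Int) + 2 := by
      simp only [List.length_cons] at hlen; push_cast at hlen ⊢; omega
    show total + pvIntOf (String.mk [c]) * (n - s + 1) + pvW rest
        = total + (pvIntOf (String.mk [c]) * ((rest.length : Int) + 2) + pvW rest)
    rw [hw]; ring

-- ===== VERDICT (by name: the statement is the Claim_ definition above) =====
theorem calc_check_digit_spec : Claim_equal_calc_check_digit := by
  intro number total _dom hpre
  unfold Spec_calc_check_digit calc_check_digit calc_check_digit_alt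
  dsimp only
  rw [pvCalcA_eq _ _ hpre.1]
  set cs := number.toList with hcs
  rw [pvFoldB_eq (cs.length : Int) cs 0 total (by omega)]
  by_cases h9 : cs.length = 9
  · simp only [h9, pvCheck]
    norm_num
  · have hle : cs.length ≤ 9 := hpre.2.2
    have : ¬ 9 ≤ cs.length := by omega
    simp only [this, h9, pvCheck]
    simp
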